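-- pv_equiv track=rewrite | github.com/victorsouza-mnz/TangentCFT | lib/tangentCFT/touple_encoder/encoder.py | __convert_path_elements
-- ===== SOURCE A (Python) =====
-- def __convert_path_elements(path, edge_map, edge_id, update_map_edge):
--     converted_value = ""
--     for label in path:
--         if label in edge_map:
--             value = chr(edge_map[label])
--         else:
--             value = chr(edge_id)
--             update_map_edge[label] = edge_id
--             edge_map[label] = edge_id
--             edge_id += 1
--         converted_value += value
--     return converted_value, edge_map, edge_id, update_map_edge
-- ===== SOURCE B (Python) =====
-- def __convert_path_elements(path, edge_map, edge_id, update_map_edge):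
--     # the labels that need new ids, in first-appearance order
--     fresh = list(dict.fromkeys(label for label in path if label not in edge_map))
--     # ids are computed arithmetically from the position, not by a running counter
--     for i, label in enumerate(fresh):
--         update_map_edge[label] = edge_id + i
--         edge_map[label] = edge_id + i
--     converted_value = ''.join(chr(edge_map[label]) for label in path)
--     return converted_value, edge_map, edge_id + len(fresh), update_map_edge
-- ===== Notes on version B (the rewrite author's own statement) =====
-- stated objective: alternative
-- what changed: Replaces A's single interleaved loop (branch per element, running counter, string accumulator) by a staged computation: dict.fromkeys dedup of the unseen labels, arithmetic id assignment via enumerate (edge_id + position, final edge_id = edge_id + len(fresh)), then a lookup-only join over path.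
import Mathlib
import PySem

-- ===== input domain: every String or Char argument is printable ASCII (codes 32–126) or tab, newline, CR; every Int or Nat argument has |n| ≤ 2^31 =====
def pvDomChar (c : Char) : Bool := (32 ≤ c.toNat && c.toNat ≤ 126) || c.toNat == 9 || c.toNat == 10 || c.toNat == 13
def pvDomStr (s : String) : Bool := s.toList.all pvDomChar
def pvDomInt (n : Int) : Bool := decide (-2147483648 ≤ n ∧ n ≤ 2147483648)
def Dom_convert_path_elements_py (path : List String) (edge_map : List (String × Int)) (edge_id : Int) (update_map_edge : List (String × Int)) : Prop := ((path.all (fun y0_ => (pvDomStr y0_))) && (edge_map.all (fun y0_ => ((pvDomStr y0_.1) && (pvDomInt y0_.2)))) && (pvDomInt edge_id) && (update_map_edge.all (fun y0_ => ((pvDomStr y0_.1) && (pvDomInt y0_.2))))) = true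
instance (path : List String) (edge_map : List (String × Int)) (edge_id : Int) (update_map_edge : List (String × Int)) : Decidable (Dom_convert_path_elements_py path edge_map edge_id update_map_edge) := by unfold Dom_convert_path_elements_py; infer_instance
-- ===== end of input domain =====

-- B stages the computation: dedup of unseen labels, arithmetic id assignment via enumerate,
-- then a lookup-only join (alternative decomposition, same cost). Both Pythons mutate
-- edge_map/update_map_edge in place; the equivalence proved is about the returned tuple.


-- chr(n), exact on the codes Pre_ admits (valid Unicode scalar values)
def pyChr (n : Int) : Char := Char.ofNat n.toNat

-- ===== PORT A =====
def convA_loop : List String → List Char → PySem.Dict String Int → Int → PySem.Dict String Int → List Char × PySem.Dict String Int × Int × PySem.Dict String Int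
  | [], acc, em, eid, um => (acc, em, eid, um)
  | label :: rest, acc, em, eid, um =>
    match em.get? label with
    | some v => convA_loop rest (acc ++ [pyChr v]) em eid um
    | none   => convA_loop rest (acc ++ [pyChr eid]) (em.insert label eid) (eid + 1) (um.insert label eid)

def convert_path_elements_py (path : List String) (edge_map : List (String × Int)) (edge_id : Int) (update_map_edge : List (String × Int)) : String × (List (String × Int)) × Int × (List (String × Int)) :=
  let r := convA_loop path [] (PySem.Dict.mk edge_map) edge_id (PySem.Dict.mk update_map_edge)
  (String.mk r.1, r.2.1.items, r.2.2.1, r.2.2.2.items)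

-- ===== PORT B =====
def convert_path_elements_py_alt (path : List String) (edge_map : List (String × Int)) (edge_id : Int) (update_map_edge : List (String × Int)) : String × (List (String × Int)) × Int × (List (String × Int)) :=
  let em0 := PySem.Dict.mk edge_map
  -- fresh = list(dict.fromkeys(label for label in path if label not in edge_map))
  let fresh := PySem.List.dedup (path.filter (fun l => !(em0.contains l)))
  -- for i, label in enumerate(fresh): update_map_edge[label] = edge_id + i; edge_map[label] = edge_id + i
  let um' := (PySem.List.enumerate fresh 0).foldl (fun d p => d.insert p.2 (edge_id + p.1)) (PySem.Dict.mk update_map_edge)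
  let em' := (PySem.List.enumerate fresh 0).foldl (fun d p => d.insert p.2 (edge_id + p.1)) em0
  -- ''.join(chr(edge_map[label]) for label in path); edge_id + len(fresh)
  (String.mk (path.map (fun l => pyChr (em'.getD l 0))), em'.items, edge_id + (fresh.length : Int), um'.items)

-- ===== PRECONDITION & SPEC =====
def pvChrOK (n : Int) : Bool := (decide (0 ≤ n) && decide (n < 55296)) || (decide (57344 ≤ n) && decide (n < 1114112))

-- Pre_ excludes inputs on which some chr() call of A gets a code < 0 or ≥ 0x110000 (A raises
-- ValueError there) and codes in the surrogate band 0xD800–0xDFFF, where A's returned str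
-- contains a lone surrogate — not a Unicode scalar value, hence not a value of the declared
-- String type (B returns the identical Python value there).
def Pre_convert_path_elements_py (path : List String) (edge_map : List (String × Int)) (edge_id : Int) (update_map_edge : List (String × Int)) : Prop :=
  (∀ l ∈ path, ∀ v : Int, (PySem.Dict.mk edge_map).get? l = some v → pvChrOK v = true) ∧
  (∀ j : Nat, j < ((path.filter (fun l => !((PySem.Dict.mk edge_map).contains l))).dedup).length → pvChrOK (edge_id + (j : Int)) = true)
instance (path : List String) (edge_map : List (String × Int)) (edge_id : Int) (update_map_edge : List (String × Int)) : Decidable (Pre_convert_path_elements_py path edge_map edge_id update_map_edge) := by unfold Pre_convert_path_elements_py; infer_instance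

def pvWitness_convert_path_elements_py : List String × (List (String × Int)) × Int × (List (String × Int)) :=
  (["a", "b", "a"], [("b", 98)], 97, [])

def Spec_convert_path_elements_py (path : List String) (edge_map : List (String × Int)) (edge_id : Int) (update_map_edge : List (String × Int)) (out : String × (List (String × Int)) × Int × (List (String × Int))) : Prop := out = convert_path_elements_py_alt path edge_map edge_id update_map_edge
instance (path : List String) (edge_map : List (String × Int)) (edge_id : Int) (update_map_edge : List (String × Int)) (out : String × (List (String × Int)) × Int × (List (String × Int))) : Decidable (Spec_convert_path_elements_py path edge_map edge_id update_map_edge out) := by unfold Spec_convert_path_elements_py; infer_instance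

-- ===== CLAIM (what is proved, stated in full; the proofs are below) =====
def Claim_equal_convert_path_elements_py : Prop := ∀ (path : List String) (edge_map : List (String × Int)) (edge_id : Int) (update_map_edge : List (String × Int)), Dom_convert_path_elements_py path edge_map edge_id update_map_edge → Pre_convert_path_elements_py path edge_map edge_id update_map_edge → Spec_convert_path_elements_py path edge_map edge_id update_map_edge (convert_path_elements_py path edge_map edge_id update_map_edge)

-- ===== LEMMAS AND PROOFS =====

-- proof-side re-statement of the id-assignment as a single A-shaped pass
def convB_assign : List String → PySem.Dict String Int → Int → PySem.Dict String Int → PySem.Dict String Int × Int × PySem.Dict String Int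
  | [], em, eid, um => (em, eid, um)
  | label :: rest, em, eid, um =>
    if em.contains label then convB_assign rest em eid um
    else convB_assign rest (em.insert label eid) (eid + 1) (um.insert label eid)

-- proof-side: insert consecutive ids starting at e
def insAll (d : PySem.Dict String Int) (e : Int) : List String → PySem.Dict String Int
  | [] => d
  | x :: xs => insAll (d.insert x e) (e + 1) xs

-- once a key is in the map, the assignment pass never changes its value
theorem convB_stable (path : List String) (em : PySem.Dict String Int) (eid : Int)
    (um : PySem.Dict String Int) (l : String) (v : Int) (h : em.get? l = some v) :
    (convB_assign path em eid um).1.get? l = some v := by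
  induction path generalizing em eid um with
  | nil => simpa [convB_assign]
  | cons a rest ih =>
    by_cases hc : em.contains a = true
    · simpa [convB_assign, hc] using ih em eid um h
    · have hne : l ≠ a := by
        intro he; subst he
        rw [PySem.Dict.contains_eq_isSome_get?, h] at hc; simp at hc
      simp only [convB_assign, hc]
      exact ih _ _ _ (by simp [PySem.Dict.get?_insert, hne, h])

-- A's interleaved loop equals the assignment pass followed by a map over path through the final table
theorem convA_eq_convB (path : List String) (em : PySem.Dict String Int) (eid : Int)
    (um : PySem.Dict String Int) (acc : List Char) :
    convA_loop path acc em eid um =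
      (acc ++ path.map (fun l => pyChr ((convB_assign path em eid um).1.getD l 0)),
       convB_assign path em eid um) := by
  induction path generalizing em eid um acc with
  | nil => simp [convA_loop, convB_assign]
  | cons label rest ih =>
    cases h : em.get? label with
    | some v =>
      have hc : em.contains label = true := by
        rw [PySem.Dict.contains_eq_isSome_get?, h]; rfl
      have hfin : (convB_assign rest em eid um).1.get? label = some v :=
        convB_stable rest em eid um label v h
      simp only [convA_loop, h, convB_assign, hc, if_true, ih, List.map_cons,
        PySem.Dict.getD_eq_get?_getD, List.append_assoc, List.singleton_append]
      simp [hfin]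
    | none =>
      have hc : em.contains label = false := by
        rw [PySem.Dict.contains_eq_isSome_get?, h]; rfl
      have hfin : (convB_assign rest (em.insert label eid) (eid + 1)
          (um.insert label eid)).1.get? label = some eid :=
        convB_stable rest _ _ _ label eid (PySem.Dict.get?_insert_self _ _ _)
      simp only [convA_loop, h, convB_assign, hc, ih, List.map_cons,
        PySem.Dict.getD_eq_get?_getD, List.append_assoc, List.singleton_append]
      simp [hfin]

-- PySem dedup steps through cons by filtering later duplicates away
theorem pydedup_cons (x : String) (xs : List String) :
    PySem.List.dedup (x :: xs) = x :: (PySem.List.dedup xs).filter (fun y => !(y == x)) := by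
  rw [PySem.List.dedup_eq_ofList, PySem.List.dedup_eq_ofList, PySem.Set.ofList_cons]; rfl

-- two filters commute
theorem filter_swap (p q : String → Bool) (l : List String) :
    (l.filter p).filter q = (l.filter q).filter p := by
  simp only [List.filter_filter]
  exact List.filter_congr (fun a _ => by rw [Bool.and_comm])

-- filter commutes with PySem dedup
theorem pydedup_filter (p : String → Bool) (xs : List String) :
    (PySem.List.dedup xs).filter p = PySem.List.dedup (xs.filter p) := by
  induction xs with
  | nil => simp [PySem.List.dedup_eq_ofList, PySem.Set.ofList_nil]
  | cons y t ih =>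
    by_cases hp : p y = true
    · rw [pydedup_cons, List.filter_cons_of_pos hp, filter_swap, ih,
        List.filter_cons_of_pos hp, pydedup_cons]
    · have hp' : p y = false := by simpa using hp
      rw [pydedup_cons, List.filter_cons_of_neg (by simp [hp']),
        List.filter_cons_of_neg (by simp [hp']), filter_swap, ih]
      apply List.filter_eq_self.mpr
      intro z hz
      have hzmem : z ∈ t.filter p := by
        rw [PySem.List.dedup_eq_ofList] at hz
        exact (PySem.Set.mem_ofList _ _).mp hz
      have hpz : p z = true := (List.mem_filter.mp hzmem).2
      have : z ≠ y := fun he => by rw [he, hp'] at hpz; cases hpz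
      simp [this]

-- the enumerate-fold of B is insAll
theorem enumFold (base : Int) (xs : List String) : ∀ (s : Int) (d : PySem.Dict String Int),
    (PySem.List.enumerate xs s).foldl (fun d p => d.insert p.2 (base + p.1)) d
      = insAll d (base + s) xs := by
  induction xs with
  | nil => intro s d; simp [PySem.List.enumerate_nil, insAll]
  | cons x t ih =>
    intro s d
    rw [PySem.List.enumerate_cons]
    simp only [List.foldl_cons]
    rw [ih (s + 1)]
    have : base + (s + 1) = (base + s) + 1 := by ring
    rw [this]; rfl

-- the A-shaped assignment pass equals dedup + consecutive inserts
theorem assign_eq (path : List String) : ∀ (em : PySem.Dict String Int) (eid : Int)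
    (um : PySem.Dict String Int),
    convB_assign path em eid um =
      (insAll em eid (PySem.List.dedup (path.filter (fun l => !(em.contains l)))),
       eid + ((PySem.List.dedup (path.filter (fun l => !(em.contains l)))).length : Int),
       insAll um eid (PySem.List.dedup (path.filter (fun l => !(em.contains l))))) := by
  induction path with
  | nil =>
    intro em eid um
    simp [convB_assign, insAll, PySem.List.dedup_eq_ofList, PySem.Set.ofList_nil]
  | cons label rest ih =>
    intro em eid um
    by_cases hc : em.contains label = true
    · have hf : (label :: rest).filter (fun l => !(em.contains l))
          = rest.filter (fun l => !(em.contains l)) :=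
        List.filter_cons_of_neg (by simp [hc])
      simp only [convB_assign, hc, if_true, hf]
      exact ih em eid um
    · have hcf : em.contains label = false := by simpa using hc
      have hf : (label :: rest).filter (fun l => !(em.contains l))
          = label :: rest.filter (fun l => !(em.contains l)) :=
        List.filter_cons_of_pos (by simp [hcf])
      have hpred : (rest.filter (fun l => !(em.contains l))).filter (fun y => !(y == label))
          = rest.filter (fun l => !((em.insert label eid).contains l)) := by
        rw [List.filter_filter]
        exact List.filter_congr (fun a _ => by
          simp [PySem.Dict.contains_insert])
      have hF : PySem.List.dedup ((label :: rest).filter (fun l => !(em.contains l)))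
          = label :: PySem.List.dedup (rest.filter (fun l => !((em.insert label eid).contains l))) := by
        rw [hf, pydedup_cons, pydedup_filter, hpred]
      simp only [convB_assign, hcf, Bool.false_eq_true, if_false, hF, insAll,
        List.length_cons]
      rw [ih (em.insert label eid) (eid + 1) (um.insert label eid)]
      simp only [Prod.mk.injEq]
      exact ⟨trivial, by push_cast; ring, trivial⟩

-- ===== VERDICT (by name: the statement is the Claim_ definition above) =====
theorem convert_path_elements_py_spec : Claim_equal_convert_path_elements_py := by
  intro path edge_map edge_id update_map_edge _ _
  unfold Spec_convert_path_elements_py convert_path_elements_py convert_path_elements_py_alt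
  rw [convA_eq_convB, assign_eq]
  simp only []
  rw [enumFold, enumFold]
  simp
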